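-- pv_equiv track=rewrite | github.com/AlifSrSE/ProblemSolves | 2021B-maximimzingMex.py | solve
-- ===== SOURCE A (Python) =====
-- def solve(a, x):
--     counts = [0] * (len(a) + 1)
--     for ai in a:
--         if ai < len(counts):
--             counts[ai] += 1
--     result = 0
--     while counts[result] != 0:
--         if result + x < len(counts):
--             counts[result + x] += counts[result] - 1
--         result += 1
--     return result
-- ===== SOURCE B (Python) =====
-- def solve(a, x):
--     n = len(a)
--     counts = [0] * (n + 1)
--     for ai in a:
--         if ai < n + 1:
--             counts[ai] += 1
--     best = n + 1
--     for r in range(min(x, n + 1)):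
--         v = r
--         carry = 0
--         while True:
--             total = (counts[v] if v <= n else 0) + carry
--             if total == 0:
--                 break
--             carry = total - 1
--             v += x
--         if v < best:
--             best = v
--     return best
-- ===== Notes on version B (the rewrite author's own statement) =====
-- stated objective: alternative
-- what changed: Keeps the same counts-building pass but replaces A's single in-place natural-order sweep that pushes surplus forward inside the mutable counts array with independent per-residue chain walks (r, r+x, r+2x, ...) each carrying a running surplus, returning the minimum first gap over the chains.
-- outside the precondition, e.g. on solve([0], -1): A returns 1, B returns 2
import Mathlib
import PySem

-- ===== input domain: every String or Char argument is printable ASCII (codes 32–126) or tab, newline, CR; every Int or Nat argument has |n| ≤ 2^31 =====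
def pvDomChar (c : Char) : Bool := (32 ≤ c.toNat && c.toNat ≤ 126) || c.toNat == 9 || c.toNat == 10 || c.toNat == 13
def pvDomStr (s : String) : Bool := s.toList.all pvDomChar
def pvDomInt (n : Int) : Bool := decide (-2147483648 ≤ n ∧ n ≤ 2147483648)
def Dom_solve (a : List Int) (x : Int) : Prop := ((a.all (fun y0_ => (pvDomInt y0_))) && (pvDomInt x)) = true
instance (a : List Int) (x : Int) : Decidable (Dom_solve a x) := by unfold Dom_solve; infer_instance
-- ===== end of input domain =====

-- B replaces A's single in-place forward-surplus sweep by independent per-residue chain walks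
-- carrying a running surplus, returning the minimum first gap over the chains (objective: alternative).

-- ===== PORT A =====
-- counts = [0]*(len(a)+1); for ai in a: if ai < len(counts): counts[ai] += 1
def solveCounts (a : List Int) : List Int :=
  a.foldl
    (fun counts ai =>
      if ai < (counts.length : Int) then
        PySem.List.pySetD counts ai (PySem.List.pyGetD counts ai 0 + 1)
      else counts)
    (List.replicate (a.length + 1) 0)

-- the while loop; `result` as a Nat index.  When result = len(counts) Python raises IndexError
-- (unreachable under Pre_solve); the port returns result there as a totality guard.
def solveLoop (x : Int) (counts : List Int) (result : Nat) : Int :=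
  if h : result < counts.length then
    if PySem.List.pyGetD counts (result : Int) 0 ≠ 0 then
      solveLoop x
        (if (result : Int) + x < (counts.length : Int) then
          PySem.List.pySetD counts ((result : Int) + x)
            (PySem.List.pyGetD counts ((result : Int) + x) 0 +
              (PySem.List.pyGetD counts (result : Int) 0 - 1))
        else counts)
        (result + 1)
    else (result : Int)
  else (result : Int)
termination_by counts.length - result
decreasing_by
  split
  · simp only [PySem.List.length_pySetD]; omega
  · omega

def solve (a : List Int) (x : Int) : Int := solveLoop x (solveCounts a) 0

-- ===== PORT B =====
-- counts = [0]*(n+1); for ai in a: if ai < n + 1: counts[ai] += 1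
def altCounts (a : List Int) : List Int :=
  a.foldl
    (fun cnts ai =>
      if ai < ((a.length : Int) + 1) then
        PySem.List.pySetD cnts ai (PySem.List.pyGetD cnts ai 0 + 1)
      else cnts)
    (List.replicate (a.length + 1) 0)

-- the inner while-loop of Source B.  Python breaks exactly when total == 0; on every state reached
-- from solve_alt, counts entries and carry are nonnegative and x ≥ 1, so the conditions
-- `0 < total ∧ 0 < x` below are totality guards equivalent to Python's `total != 0`.
def chainWalk (counts : List Int) (n : Nat) (x : Int) (v : Int) (carry : Int) : Int :=
  let total := (if v ≤ (n : Int) then PySem.List.pyGetD counts v 0 else 0) + carry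
  if 0 < total ∧ 0 < x then chainWalk counts n x (v + x) (total - 1)
  else v
termination_by ((((n : Int) + 1 - v).toNat, carry.toNat) : Nat × Nat)
decreasing_by
  rename_i h
  by_cases hv : v ≤ (n : Int)
  · apply Prod.Lex.left
    have hx : 0 < x := h.2
    omega
  · have h1 : (((n : Int) + 1 - (v + x)).toNat) = 0 := by omega
    have h2 : (((n : Int) + 1 - v).toNat) = 0 := by omega
    rw [h1, h2, dif_neg hv]
    apply @Prod.Lex.right Nat Nat _ _ 0
    have h' : 0 < (if h : v ≤ (n : Int) then PySem.List.pyGetD counts v 0 else 0) + carry := h.1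
    rw [dif_neg hv] at h'
    omega

def solve_alt (a : List Int) (x : Int) : Int :=
  (PySem.List.pyRange 0 (min x ((a.length : Int) + 1)) 1).foldl
    (fun best r =>
      let v := chainWalk (altCounts a) a.length x r 0
      if v < best then v else best)
    ((a.length : Int) + 1)

-- ===== PRECONDITION & SPEC =====
-- Pre_solve excludes inputs where A raises an IndexError during counting (some ai < -len(a)-1)
-- and inputs with x ≤ 0, on which A may diverge (x = 0), raise, or return values produced by
-- wrap-assignment into already-scanned positions; see claim.json cite for an excluded returning input.
def Pre_solve (a : List Int) (x : Int) : Prop :=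
  (∀ ai ∈ a, -((a.length : Int) + 1) ≤ ai) ∧ 1 ≤ x
instance (a : List Int) (x : Int) : Decidable (Pre_solve a x) := by unfold Pre_solve; infer_instance
def pvWitness_solve : List Int × Int := ([0, 2, 1, 5], 2)

def Spec_solve (a : List Int) (x : Int) (out : Int) : Prop := out = solve_alt a x
instance (a : List Int) (x : Int) (out : Int) : Decidable (Spec_solve a x out) := by unfold Spec_solve; infer_instance

-- ===== CLAIM (what is proved, stated in full; the proofs are below) =====
def Claim_equal_solve : Prop := ∀ (a : List Int) (x : Int), Dom_solve a x → Pre_solve a x → Spec_solve a x (solve a x)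

-- ===== LEMMAS AND PROOFS =====

-- the common mathematical model: c = the counts array as a function (0 beyond n),
-- g v = the propagated count at position v (count plus surplus carried along the residue chain).
def cfun (cb : List Int) (n : Nat) (v : Nat) : Int := if v ≤ n then cb.getD v 0 else 0

def gfun (c : Nat → Int) (xn : Nat) (v : Nat) : Int :=
  if h : 0 < xn ∧ xn ≤ v then
    let p := gfun c xn (v - xn)
    c v + (if 0 < p then p - 1 else 0)
  else c v
termination_by v
decreasing_by omega

-- the first position ≥ t (up to n+1) where g vanishes
def ansFrom (c : Nat → Int) (xn n t : Nat) : Nat :=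
  if t ≤ n then (if gfun c xn t = 0 then t else ansFrom c xn n (t + 1)) else t
termination_by n + 1 - t
decreasing_by omega

theorem gfun_nonneg (c : Nat → Int) (xn : Nat) (hc : ∀ v, 0 ≤ c v) (v : Nat) :
    0 ≤ gfun c xn v := by
  induction v using Nat.strong_induction_on with
  | _ v ih =>
    rw [gfun]
    split
    · rename_i h
      have := ih (v - xn) (by omega)
      have := hc v
      dsimp only
      split <;> omega
    · exact hc v

-- getD after set, with the 0 default
theorem getD_set_int (l : List Int) (m : Nat) (w : Int) (v : Nat) :
    (l.set m w).getD v 0 = if v = m ∧ m < l.length then w else l.getD v 0 := by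
  simp only [List.getD_eq_getElem?_getD, List.getElem?_set]
  split_ifs with h1 h2 h3 h4 <;> simp_all

-- a foldl whose step preserves length preserves length
theorem foldl_build_length (f : List Int → Int → List Int)
    (hf : ∀ l ai, (f l ai).length = l.length) :
    ∀ (a : List Int) (init : List Int), (a.foldl f init).length = init.length := by
  intro a
  induction a with
  | nil => intro init; rfl
  | cons ai a ih => intro init; rw [List.foldl_cons, ih, hf]

theorem pySetD_length (l : List Int) (i w : Int) :
    (PySem.List.pySetD l i w).length = l.length := PySem.List.length_pySetD l i w

theorem altCounts_length (a : List Int) : (altCounts a).length = a.length + 1 := by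
  unfold altCounts
  rw [foldl_build_length]
  · exact List.length_replicate
  · intro l ai; split
    · exact pySetD_length _ _ _
    · rfl

theorem solveCounts_eq_aux (n : Nat) :
    ∀ (l : List Int) (init : List Int), init.length = n + 1 →
      l.foldl
        (fun counts ai =>
          if ai < (counts.length : Int) then
            PySem.List.pySetD counts ai (PySem.List.pyGetD counts ai 0 + 1)
          else counts) init =
      l.foldl
        (fun cnts ai =>
          if ai < ((n : Int) + 1) then
            PySem.List.pySetD cnts ai (PySem.List.pyGetD cnts ai 0 + 1)
          else cnts) init := by
  intro l
  induction l with
  | nil => intro init _; rfl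
  | cons ai l ih =>
    intro init hlen
    rw [List.foldl_cons, List.foldl_cons]
    have hcond : (ai < (init.length : Int)) ↔ (ai < ((n : Int) + 1)) := by
      rw [hlen]; push_cast; omega
    by_cases hc : ai < ((n : Int) + 1)
    · rw [if_pos (hcond.mpr hc), if_pos hc]
      exact ih _ (by rw [pySetD_length]; exact hlen)
    · rw [if_neg (fun h => hc (hcond.mp h)), if_neg hc]
      exact ih _ hlen

theorem solveCounts_eq (a : List Int) : solveCounts a = altCounts a := by
  unfold solveCounts altCounts
  exact solveCounts_eq_aux a.length a _ (by simp)

-- every entry of pySetD l i w is w or an entry of l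
theorem pySetD_mem_cases (l : List Int) (i w : Int) (y : Int)
    (hy : y ∈ PySem.List.pySetD l i w) : y = w ∨ y ∈ l := by
  unfold PySem.List.pySetD PySem.List.pySet? PySem.List.pyIdx? at hy
  split_ifs at hy <;> simp only [Option.map_some, Option.map_none, Option.getD_some,
    Option.getD_none] at hy
  · rcases List.mem_or_eq_of_mem_set hy with h | h
    · right; exact h
    · left; exact h
  · right; exact hy
  · rcases List.mem_or_eq_of_mem_set hy with h | h
    · right; exact h
    · left; exact h
  · right; exact hy

theorem pyGetD_zero_nonneg (l : List Int) (i : Int) (hl : ∀ y ∈ l, 0 ≤ y) :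
    0 ≤ PySem.List.pyGetD l i 0 := by
  rcases h : PySem.List.pyGet? l i with _ | val
  · rw [PySem.List.pyGetD_of_none l i 0 h]
  · have hval : PySem.List.pyGetD l i 0 = val := by
      unfold PySem.List.pyGetD
      rw [h]; rfl
    rw [hval]
    exact hl val (PySem.List.mem_of_pyGet?_eq_some l h)

theorem altCounts_nonneg_aux (n : Nat) :
    ∀ (l : List Int) (init : List Int), (∀ y ∈ init, 0 ≤ y) →
      ∀ y ∈ l.foldl
        (fun cnts ai =>
          if ai < ((n : Int) + 1) then
            PySem.List.pySetD cnts ai (PySem.List.pyGetD cnts ai 0 + 1)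
          else cnts) init, 0 ≤ y := by
  intro l
  induction l with
  | nil => intro init h; exact h
  | cons ai l ih =>
    intro init h
    rw [List.foldl_cons]
    apply ih
    intro y hy
    split at hy
    · rcases pySetD_mem_cases _ _ _ _ hy with he | hm
      · rw [he]
        have := pyGetD_zero_nonneg init ai h
        omega
      · exact h y hm
    · exact h y hy

theorem altCounts_nonneg (a : List Int) (v : Nat) : 0 ≤ (altCounts a).getD v 0 := by
  have hmem : ∀ y ∈ altCounts a, 0 ≤ y := by
    unfold altCounts
    apply altCounts_nonneg_aux
    intro y hy
    rw [List.eq_of_mem_replicate hy]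
  rw [List.getD_eq_getElem?_getD]
  rcases h : (altCounts a)[v]? with _ | val
  · rfl
  · have : val ∈ altCounts a := List.mem_of_getElem? h
    exact hmem val this

theorem cfun_nonneg (cb : List Int) (n : Nat) (hcb : ∀ v, 0 ≤ cb.getD v 0) (v : Nat) :
    0 ≤ cfun cb n v := by
  unfold cfun; split
  · exact hcb v
  · rfl

theorem ansFrom_le (c : Nat → Int) (xn n : Nat) : ∀ t, t ≤ n + 1 → ansFrom c xn n t ≤ n + 1 := by
  intro t
  induction t using ansFrom.induct c xn n with
  | case1 t h1 h2 => intro _; rw [ansFrom, if_pos h1, if_pos h2]; omega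
  | case2 t h1 h2 ih => intro _; rw [ansFrom, if_pos h1, if_neg h2]; exact ih (by omega)
  | case3 t h1 => intro ht; rw [ansFrom, if_neg h1]; exact ht

theorem ansFrom_lt_ne (c : Nat → Int) (xn n : Nat) :
    ∀ t u, t ≤ u → u < ansFrom c xn n t → gfun c xn u ≠ 0 := by
  intro t
  induction t using ansFrom.induct c xn n with
  | case1 t h1 h2 => intro u hu1 hu2; rw [ansFrom, if_pos h1, if_pos h2] at hu2; omega
  | case2 t h1 h2 ih =>
    intro u hu1 hu2
    rw [ansFrom, if_pos h1, if_neg h2] at hu2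
    by_cases he : u = t
    · rw [he]; exact h2
    · exact ih u (by omega) hu2
  | case3 t h1 => intro u hu1 hu2; rw [ansFrom, if_neg h1] at hu2; omega

theorem ansFrom_zero (c : Nat → Int) (xn n : Nat) :
    ∀ t, ansFrom c xn n t ≤ n → gfun c xn (ansFrom c xn n t) = 0 := by
  intro t
  induction t using ansFrom.induct c xn n with
  | case1 t h1 h2 => intro _; rw [ansFrom, if_pos h1, if_pos h2]; exact h2
  | case2 t h1 h2 ih => intro h; rw [ansFrom, if_pos h1, if_neg h2] at h ⊢; exact ih h
  | case3 t h1 => intro h; rw [ansFrom, if_neg h1] at h; omega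

-- the A-side loop computes ansFrom, given the propagation invariant
theorem loopA_eq (n : Nat) (x : Int) (hx : 1 ≤ x) (c : Nat → Int) (hc : ∀ v, 0 ≤ c v) :
    ∀ (f t : Nat) (counts : List Int), n + 1 - t ≤ f → t ≤ n + 1 → counts.length = n + 1 →
      (∀ u, u < t → 0 < gfun c x.toNat u) →
      (∀ v, t ≤ v → v ≤ n →
        counts.getD v 0 =
          c v + (if x.toNat ≤ v ∧ v - x.toNat < t then gfun c x.toNat (v - x.toNat) - 1 else 0)) →
      solveLoop x counts t = (ansFrom c x.toNat n t : Int) := by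
  intro f
  induction f with
  | zero =>
    intro t counts hf ht hlen _ _
    have ht' : t = n + 1 := by omega
    rw [solveLoop, dif_neg (by omega), ansFrom, if_neg (by omega)]
  | succ f ih =>
    intro t counts hf ht hlen hgpos hinv
    by_cases htn : t ≤ n
    · -- in range: counts[t] = gfun c xn t
      have hxn : 0 < x.toNat := by omega
      have hread : counts.getD t 0 = gfun c x.toNat t := by
        conv_rhs => rw [gfun]
        rw [hinv t le_rfl htn]
        by_cases hle : x.toNat ≤ t
        · rw [dif_pos ⟨hxn, hle⟩]
          have hpos := hgpos (t - x.toNat) (by omega)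
          dsimp only
          rw [if_pos (show x.toNat ≤ t ∧ t - x.toNat < t by omega), if_pos hpos]
        · rw [dif_neg (by omega), if_neg (by omega)]
          ring
      have hpy : PySem.List.pyGetD counts (t : Int) 0 = counts.getD t 0 := by
        rw [PySem.List.pyGetD_natCast]
      rw [solveLoop, dif_pos (by omega)]
      by_cases hz : gfun c x.toNat t = 0
      · rw [if_neg (by rw [hpy, hread]; simp [hz]), ansFrom, if_pos htn, if_pos hz]
      · rw [if_pos (by rw [hpy, hread]; exact hz), ansFrom, if_pos htn, if_neg hz]
        have hgt : 0 < gfun c x.toNat t := by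
          have := gfun_nonneg c x.toNat hc t; omega
        have hcast : (t : Int) + x = ((t + x.toNat : Nat) : Int) := by push_cast; omega
        have hcnd : ((t : Int) + x < (counts.length : Int)) ↔ t + x.toNat ≤ n := by
          rw [hcast, hlen]; push_cast; omega
        refine ih (t + 1) _ (by omega) (by omega) ?_ ?_ ?_
        · -- length preserved
          split
          · rw [PySem.List.length_pySetD]; exact hlen
          · exact hlen
        · intro u hu
          by_cases hut : u < t
          · exact hgpos u hut
          · have heq : u = t := by omega
            rw [heq]; exact hgt
        · -- invariant maintenance
          intro v hv1 hv2
          by_cases hcc : t + x.toNat ≤ n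
          · rw [if_pos (hcnd.mpr hcc), hcast, PySem.List.pySetD_natCast, getD_set_int]
            by_cases hveq : v = t + x.toNat
            · rw [if_pos ⟨hveq, by omega⟩, PySem.List.pyGetD_natCast, hpy, hread,
                hinv (t + x.toNat) (by omega) hcc, hveq]
              rw [if_neg (by omega), if_pos (show x.toNat ≤ t + x.toNat ∧ t + x.toNat - x.toNat < t + 1 by omega)]
              have heq2 : t + x.toNat - x.toNat = t := by omega
              rw [heq2]; ring
            · rw [if_neg (by tauto), hinv v (by omega) hv2]
              by_cases hcv : x.toNat ≤ v ∧ v - x.toNat < t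
              · rw [if_pos hcv, if_pos ⟨hcv.1, by omega⟩]
              · rw [if_neg hcv, if_neg (by
                  intro hcv2
                  exact hcv ⟨hcv2.1, by omega⟩)]
          · rw [if_neg (by rw [hcnd]; omega), hinv v (by omega) hv2]
            by_cases hcv : x.toNat ≤ v ∧ v - x.toNat < t
            · rw [if_pos hcv, if_pos ⟨hcv.1, by omega⟩]
            · rw [if_neg hcv, if_neg (by
                intro hcv2
                exact hcv ⟨hcv2.1, by omega⟩)]
    · -- t = n + 1: Python would raise; but ansFrom also returns t
      rw [solveLoop, dif_neg (by omega), ansFrom, if_neg (by omega)]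

-- past the array, the walk is a pure countdown of the carry
theorem walk_past (cb : List Int) (n : Nat) (x : Int) (hx : 0 < x) :
    ∀ (k : Nat) (v : Int), (n : Int) < v → chainWalk cb n x v (k : Int) = v + k * x := by
  intro k
  induction k with
  | zero =>
    intro v hv
    rw [chainWalk]
    have hv' : ¬ (v ≤ (n : Int)) := by omega
    simp only [if_neg hv']
    norm_num
  | succ k ih =>
    intro v hv
    rw [chainWalk]
    have hv' : ¬ (v ≤ (n : Int)) := by omega
    simp only [if_neg hv']
    rw [if_pos ⟨by push_cast; omega, hx⟩]
    rw [show (0 : Int) + ((k : Nat) + 1 : Nat) - 1 = ((k : Nat) : Int) by omega,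
      ih (v + x) (by omega)]
    push_cast; ring

-- past the array, g is the same countdown
theorem g_past (c : Nat → Int) (xn n : Nat) (hcn : ∀ v, n < v → c v = 0) (hxn : 0 < xn)
    (w : Nat) (hw : n < w) (k : Nat) (hk : gfun c xn w = (k : Int)) :
    ∀ i, i ≤ k → gfun c xn (w + i * xn) = (k : Int) - (i : Int) := by
  intro i
  induction i with
  | zero => intro _; simpa using hk
  | succ i ih =>
    intro hik
    have hprev : gfun c xn (w + i * xn) = (k : Int) - (i : Int) := ih (by omega)
    have hmul : w + (i + 1) * xn = (w + i * xn) + xn := by ring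
    rw [hmul, gfun, dif_pos ⟨hxn, by omega⟩]
    dsimp only
    rw [show w + i * xn + xn - xn = w + i * xn by omega, hprev, hcn _ (by omega),
      if_pos (by omega)]
    push_cast; ring

-- starting past the array, the walk result is the first zero of g along the chain
theorem walk_main_past (cb : List Int) (n : Nat) (x : Int) (hx : 1 ≤ x)
    (hcn : ∀ v, n < v → cfun cb n v = 0) (w : Nat) (carry : Int) (hw : n < w)
    (hcar : 0 ≤ carry) (hg : gfun (cfun cb n) x.toNat w = cfun cb n w + carry) :
    ∃ m j : Nat, chainWalk cb n x (w : Int) carry = (m : Int) ∧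
      gfun (cfun cb n) x.toNat m = 0 ∧ m = w + j * x.toNat ∧
      (∀ i, i < j → 0 < gfun (cfun cb n) x.toNat (w + i * x.toNat)) := by
  have hxn : 0 < x.toNat := by omega
  obtain ⟨k, hk⟩ : ∃ k : Nat, carry = (k : Int) := ⟨carry.toNat, by omega⟩
  have hxx : ((x.toNat : Nat) : Int) = x := by omega
  have hg0 : gfun (cfun cb n) x.toNat w = (k : Int) := by rw [hg, hcn w hw, hk]; ring
  refine ⟨w + k * x.toNat, k, ?_, ?_, rfl, ?_⟩
  · rw [hk, walk_past cb n x (by omega) k w (by omega),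
      show ((w + k * x.toNat : Nat) : Int) = (w : Int) + (k : Int) * ((x.toNat : Nat) : Int) by
        push_cast; ring,
      hxx]
  · have := g_past (cfun cb n) x.toNat n hcn hxn w hw k hg0 k le_rfl
    omega
  · intro i hi
    have := g_past (cfun cb n) x.toNat n hcn hxn w hw k hg0 i (by omega)
    omega

-- the chain walk finds the first zero of g along its residue chain
theorem walk_main (cb : List Int) (n : Nat) (x : Int) (hx : 1 ≤ x)
    (hc : ∀ v, 0 ≤ cfun cb n v) :
    ∀ (f w : Nat) (carry : Int), n + 1 - w ≤ f → 0 ≤ carry →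
      gfun (cfun cb n) x.toNat w = cfun cb n w + carry →
      ∃ m j : Nat, chainWalk cb n x (w : Int) carry = (m : Int) ∧
        gfun (cfun cb n) x.toNat m = 0 ∧ m = w + j * x.toNat ∧
        (∀ i, i < j → 0 < gfun (cfun cb n) x.toNat (w + i * x.toNat)) := by
  intro f
  have hxn : 0 < x.toNat := by omega
  have hcn : ∀ v, n < v → cfun cb n v = 0 := by
    intro v hv; unfold cfun; rw [if_neg (by omega)]
  induction f with
  | zero =>
    intro w carry hf hcar hg
    exact walk_main_past cb n x hx hcn w carry (by omega) hcar hg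
  | succ f ih =>
    intro w carry hf hcar hg
    by_cases hw : n < w
    · exact walk_main_past cb n x hx hcn w carry hw hcar hg
    · -- w ≤ n: one unfold, then the inductive hypothesis
      have hwn : w ≤ n := by omega
      have hcw : cfun cb n w = cb.getD w 0 := by unfold cfun; rw [if_pos hwn]
      have htot : (if (w : Int) ≤ (n : Int) then PySem.List.pyGetD cb (w : Int) 0 else 0) + carry
          = gfun (cfun cb n) x.toNat w := by
        rw [if_pos (by omega), PySem.List.pyGetD_natCast, hg, hcw]
      by_cases hz : gfun (cfun cb n) x.toNat w = 0
      · refine ⟨w, 0, ?_, hz, by omega, by omega⟩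
        rw [chainWalk]
        simp only [htot, hz]
        norm_num
      · have hgt : 0 < gfun (cfun cb n) x.toNat w := by
          have := gfun_nonneg (cfun cb n) x.toNat hc w; omega
        have hstep : gfun (cfun cb n) x.toNat (w + x.toNat)
            = cfun cb n (w + x.toNat) + (gfun (cfun cb n) x.toNat w - 1) := by
          rw [gfun, dif_pos ⟨hxn, by omega⟩]
          dsimp only
          rw [show w + x.toNat - x.toNat = w by omega, if_pos hgt]
        obtain ⟨m, j, h1, h2, h3, h4⟩ :=
          ih (w + x.toNat) (gfun (cfun cb n) x.toNat w - 1) (by omega) (by omega) hstep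
        refine ⟨m, j + 1, ?_, h2, by rw [h3]; ring, ?_⟩
        · rw [chainWalk]
          simp only [htot]
          rw [if_pos ⟨hgt, by omega⟩,
            show (w : Int) + x = ((w + x.toNat : Nat) : Int) by push_cast; omega]
          exact h1
        · intro i hi
          rcases Nat.eq_zero_or_pos i with hi0 | hipos
          · rw [hi0]; simpa using hgt
          · have hchain := h4 (i - 1) (by omega)
            have harg : w + x.toNat + (i - 1) * x.toNat = w + i * x.toNat := by
              cases i with
              | zero => omega
              | succ i' => simp only [Nat.add_sub_cancel, Nat.succ_mul]; ring
            rw [harg] at hchain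
            exact hchain

-- the running-minimum fold: its result is the initial value or one of the F r, and bounds all of them
theorem foldl_min_facts (F : Int → Int) :
    ∀ (L : List Int) (init : Int),
      ((L.foldl (fun best r => if F r < best then F r else best) init) = init ∨
        ∃ r ∈ L, (L.foldl (fun best r => if F r < best then F r else best) init) = F r) ∧
      (L.foldl (fun best r => if F r < best then F r else best) init) ≤ init ∧
      (∀ r ∈ L, (L.foldl (fun best r => if F r < best then F r else best) init) ≤ F r) := by
  intro L
  induction L with
  | nil => intro init; exact ⟨Or.inl rfl, le_rfl, by simp⟩
  | cons a L ih =>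
    intro init
    rw [List.foldl_cons]
    obtain ⟨h1, h2, h3⟩ := ih (if F a < init then F a else init)
    refine ⟨?_, ?_, ?_⟩
    · rcases h1 with h | ⟨r, hr, he⟩
      · by_cases hfa : F a < init
        · right; exact ⟨a, by simp, by rw [h, if_pos hfa]⟩
        · left; rw [h, if_neg hfa]
      · right; exact ⟨r, by simp [hr], he⟩
    · have : (if F a < init then F a else init) ≤ init := by split <;> omega
      omega
    · intro r hr
      rcases List.mem_cons.mp hr with he | hm
      · have hinit : (if F a < init then F a else init) ≤ F a := by split <;> omega
        rw [he]; omega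
      · exact h3 r hm

theorem solve_alt_eq (a : List Int) (x : Int) (hx : 1 ≤ x) :
    solve_alt a x = (ansFrom (cfun (altCounts a) a.length) x.toNat a.length 0 : Int) := by
  have hxn : 0 < x.toNat := by omega
  have hxx : ((x.toNat : Nat) : Int) = x := by omega
  set n := a.length with hn
  set cb := altCounts a with hcb
  set c := cfun cb n with hcdef
  set xn := x.toNat with hxndef
  set m := ansFrom c xn n 0 with hm
  have hc : ∀ v, 0 ≤ c v := cfun_nonneg cb n (altCounts_nonneg a)
  have hmle : m ≤ n + 1 := ansFrom_le c xn n 0 (by omega)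
  -- each chain walk lands on a zero of g no earlier than m
  have hgap : ∀ r : Int, 0 ≤ r → r < x → r < (n : Int) + 1 →
      ∃ mr j : Nat, chainWalk cb n x r 0 = (mr : Int) ∧ gfun c xn mr = 0 ∧
        mr = r.toNat + j * xn ∧ (∀ i, i < j → 0 < gfun c xn (r.toNat + i * xn)) ∧ m ≤ mr := by
    intro r h0 hrx hrn
    have hr : r = ((r.toNat : Nat) : Int) := by omega
    have hwlt : r.toNat < xn := by omega
    have hginit : gfun c xn r.toNat = c r.toNat + 0 := by
      rw [gfun, dif_neg (by omega)]; ring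
    obtain ⟨mr, j, h1, h2, h3, h4⟩ :=
      walk_main cb n x hx hc (n + 1) r.toNat 0 (by omega) le_rfl hginit
    refine ⟨mr, j, by rw [hr]; exact h1, h2, h3, h4, ?_⟩
    by_contra hlt
    exact ansFrom_lt_ne c xn n 0 mr (by omega) (by omega) h2
  -- rewrite the fold
  show (PySem.List.pyRange 0 (min x ((n : Int) + 1)) 1).foldl
      (fun best r => if chainWalk cb n x r 0 < best then chainWalk cb n x r 0 else best)
      ((n : Int) + 1) = (m : Int)
  obtain ⟨h1, h2, h3⟩ := foldl_min_facts (fun r => chainWalk cb n x r 0)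
    (PySem.List.pyRange 0 (min x ((n : Int) + 1)) 1) ((n : Int) + 1)
  by_cases hmn : m ≤ n
  · -- the chain of m % xn achieves exactly m
    have hr0 : ((m % xn : Nat) : Int) ∈ PySem.List.pyRange 0 (min x ((n : Int) + 1)) 1 := by
      rw [PySem.List.mem_pyRange_one]
      have hmod : m % xn < xn := Nat.mod_lt _ hxn
      have hmod2 : m % xn ≤ m := Nat.mod_le _ _
      constructor
      · positivity
      · have : ((m % xn : Nat) : Int) < (xn : Int) := by exact_mod_cast hmod
        rw [hxx] at this
        have : ((m % xn : Nat) : Int) < (n : Int) + 1 := by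
          have : m % xn ≤ n := by omega
          exact_mod_cast Nat.lt_succ_of_le this
        omega
    obtain ⟨mr, j, hw1, hw2, hw3, hw4, hw5⟩ := hgap ((m % xn : Nat) : Int)
      (by positivity)
      (by rw [← hxx]; exact_mod_cast Nat.mod_lt _ hxn)
      (by
        have : m % xn ≤ n := le_trans (Nat.mod_le _ _) (by omega)
        exact_mod_cast Nat.lt_succ_of_le this)
    have htonat : (((m % xn : Nat) : Int)).toNat = m % xn := Int.toNat_natCast _
    rw [htonat] at hw3 hw4
    -- mr = m
    have hq : m % xn + m / xn * xn = m := Nat.mod_add_div' m xn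
    have hmr : mr = m := by
      by_contra hne
      have hlt : m < mr := by omega
      have hqj : m / xn < j := by
        by_contra hge
        have hmm : j * xn ≤ m / xn * xn := Nat.mul_le_mul_right xn (by omega)
        omega
      have hpos := hw4 (m / xn) hqj
      rw [hq] at hpos
      have hz0 := ansFrom_zero c xn n 0 hmn
      rw [← hm] at hz0
      omega
    have hF : chainWalk cb n x ((m % xn : Nat) : Int) 0 = (m : Int) := by rw [hw1, hmr]
    have hub := h3 _ hr0
    rw [hF] at hub
    rcases h1 with he | ⟨r, hr, he⟩
    · -- result = n+1; but it is ≤ m ≤ n < n+1, contradiction unless equal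
      rw [he] at hub ⊢
      have : (m : Int) ≤ (n : Int) + 1 := by exact_mod_cast hmle
      omega
    · rw [he] at hub ⊢
      obtain ⟨mr', j', hv1, hv2, _, _, hv5⟩ := hgap r
        (by rw [PySem.List.mem_pyRange_one] at hr; exact hr.1)
        (by rw [PySem.List.mem_pyRange_one] at hr; have := hr.2; omega)
        (by rw [PySem.List.mem_pyRange_one] at hr; have := hr.2; omega)
      rw [hv1] at hub ⊢
      have : (m : Int) ≤ (mr' : Int) := by exact_mod_cast hv5
      omega
  · -- m = n + 1: no chain improves on the initial value
    have hmeq : m = n + 1 := by omega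
    rcases h1 with he | ⟨r, hr, he⟩
    · rw [he, hmeq]; push_cast; ring
    · rw [he]
      obtain ⟨mr', j', hv1, hv2, _, _, hv5⟩ := hgap r
        (by rw [PySem.List.mem_pyRange_one] at hr; exact hr.1)
        (by rw [PySem.List.mem_pyRange_one] at hr; have := hr.2; omega)
        (by rw [PySem.List.mem_pyRange_one] at hr; have := hr.2; omega)
      have hub := h3 _ hr
      rw [he, hv1] at hub
      rw [hv1]
      have h5' : (m : Int) ≤ (mr' : Int) := by exact_mod_cast hv5
      have h2' := h2
      rw [he, hv1] at h2'
      have : ((n : Nat) : Int) + 1 = (m : Int) := by rw [hmeq]; push_cast; ring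
      omega

theorem solve_eq (a : List Int) (x : Int) (hx : 1 ≤ x) :
    solve a x = (ansFrom (cfun (altCounts a) a.length) x.toNat a.length 0 : Int) := by
  unfold solve
  rw [solveCounts_eq a]
  apply loopA_eq a.length x hx (cfun (altCounts a) a.length)
    (cfun_nonneg _ _ (altCounts_nonneg a)) (a.length + 1) 0 (altCounts a)
    (by omega) (by omega) (altCounts_length a)
    (by intro u hu; omega)
  intro v _ hv
  rw [if_neg (by omega)]
  unfold cfun
  rw [if_pos hv]
  ring

theorem solve_spec' : ∀ (a : List Int) (x : Int), Pre_solve a x → solve a x = solve_alt a x := by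
  intro a x hpre
  rw [solve_eq a x hpre.2, solve_alt_eq a x hpre.2]

-- ===== VERDICT (by name: the statement is the Claim_ definition above) =====
theorem solve_spec : Claim_equal_solve := by
  intro a x _ hpre
  unfold Spec_solve
  exact solve_spec' a x hpre
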